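-- pv_equiv track=rewrite | github.com/katismet/gpo-assistant | app/bitrix_field_map.py | upper_to_camel
-- ===== SOURCE A (Python) =====
-- def upper_to_camel(uf_name: str) -> str:
--     """Конвертирует UF_CRM_9_UF_SHIFT_ID в ufCrm9UfShiftId (формат для Bitrix24 API).
--
--     Bitrix24 API принимает поля в camelCase формате при создании/обновлении записей,
--     хотя возвращает их в UPPER_CASE в некоторых методах.
--     """
--     if not uf_name.startswith("UF_"):
--         return uf_name
--
--     parts = uf_name.split("_")
--     result = parts[0].lower()  # uf
--     for part in parts[1:]:
--         if part:
--             if part.isdigit():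
--                 result += part
--             else:
--                 result += part.capitalize()
--     return result
-- ===== SOURCE B (Python) =====
-- def upper_to_camel(uf_name: str) -> str:
--     """Single left-to-right scan instead of split/capitalize/join."""
--     if not uf_name.startswith("UF_"):
--         return uf_name
--     out = ["uf"]
--     word_start = True
--     for ch in uf_name[3:]:
--         if ch == "_":
--             word_start = True
--         elif word_start:
--             out.append(ch.upper())
--             word_start = False
--         else:
--             out.append(ch.lower())
--     return "".join(out)
-- ===== Notes on version B (the rewrite author's own statement) =====
-- stated objective: simpler
-- what changed: Replaces the split-on-underscore / per-part capitalize / concatenate pipeline with a single left-to-right character scan carrying a word-start flag.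
import Mathlib
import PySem

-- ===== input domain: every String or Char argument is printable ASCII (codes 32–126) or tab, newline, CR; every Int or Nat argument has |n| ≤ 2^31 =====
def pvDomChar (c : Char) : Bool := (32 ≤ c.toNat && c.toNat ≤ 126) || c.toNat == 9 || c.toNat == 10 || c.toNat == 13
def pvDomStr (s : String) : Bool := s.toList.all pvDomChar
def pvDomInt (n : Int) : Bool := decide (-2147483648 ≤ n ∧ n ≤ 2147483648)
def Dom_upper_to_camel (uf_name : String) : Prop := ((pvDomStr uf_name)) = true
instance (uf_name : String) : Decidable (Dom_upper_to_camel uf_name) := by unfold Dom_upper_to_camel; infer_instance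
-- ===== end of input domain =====

-- B replaces split/capitalize/join with a single left-to-right scan carrying a word-start flag (objective: simpler one-pass decomposition, same cost).

-- ===== PORT A =====
-- str.capitalize(): first char uppercased, rest lowercased (exact on the ASCII domain)
def pyCapitalizeL (p : List Char) : List Char :=
  match p with
  | [] => []
  | c :: rest => PySem.Chars.upperChar c :: PySem.Chars.lower rest

def upper_to_camel (uf_name : String) : String :=
  if !(PySem.Str.startswith uf_name "UF_") then uf_name
  else
    let parts := PySem.Chars.splitOn uf_name.toList "_".toList
    let result := PySem.Chars.lower (parts.headD [])   -- parts[0].lower(); split never returns an empty list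
    let result := (parts.drop 1).foldl (fun result part =>
      if part ≠ [] then
        if PySem.Chars.strIsdigit part then result ++ part
        else result ++ pyCapitalizeL part
      else result) result
    String.ofList result

-- ===== PORT B =====
def upper_to_camel_alt (uf_name : String) : String :=
  if !(PySem.Str.startswith uf_name "UF_") then uf_name
  else
    let st := (PySem.List.slice uf_name.toList (some 3) none).foldl
      (fun (st : List Char × Bool) ch =>
        if ch = '_' then (st.1, true)
        else if st.2 then (st.1 ++ [PySem.Chars.upperChar ch], false)
        else (st.1 ++ [PySem.Chars.lowerChar ch], false))
      (['u', 'f'], true)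
    String.ofList st.1

-- ===== PRECONDITION & SPEC =====
def Spec_upper_to_camel (uf_name : String) (out : String) : Prop := out = upper_to_camel_alt uf_name
instance (uf_name : String) (out : String) : Decidable (Spec_upper_to_camel uf_name out) := by unfold Spec_upper_to_camel; infer_instance

-- ===== CLAIM (what is proved, stated in full; the proofs are below) =====
def Claim_equal_upper_to_camel : Prop := ∀ (uf_name : String), Dom_upper_to_camel uf_name → Spec_upper_to_camel uf_name (upper_to_camel uf_name)

-- ===== LEMMAS AND PROOFS =====

-- A recursive characterization of PySem.Chars.splitOn with separator "_"
def mySplit : List Char → List (List Char)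
  | [] => [[]]
  | c :: cs => if c = '_' then [] :: mySplit cs
               else (c :: (mySplit cs).headD []) :: (mySplit cs).tail

-- B's scan as a pure function of the remaining characters and the word-start flag
def gScan : List Char → Bool → List Char
  | [], _ => []
  | c :: cs, flag =>
      if c = '_' then gScan cs true
      else (if flag then PySem.Chars.upperChar c else PySem.Chars.lowerChar c) :: gScan cs false

theorem mySplit_cons_exists (cs : List Char) : ∃ h t, mySplit cs = h :: t := by
  cases cs with
  | nil => exact ⟨[], [], rfl⟩
  | cons c cs =>
    by_cases h : c = '_' <;> simp [mySplit, h]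

theorem go_spec : ∀ (fuel : Nat) (l cur : List Char) (accs : List (List Char)),
    l.length ≤ fuel →
    PySem.Chars.splitOn.go ['_'] fuel l cur accs =
      accs.reverse ++ ((cur.reverse ++ (mySplit l).headD []) :: (mySplit l).tail) := by
  intro fuel
  induction fuel with
  | zero =>
    intro l cur accs hl
    have : l = [] := List.eq_nil_of_length_eq_zero (Nat.le_zero.mp hl)
    subst this
    simp [PySem.Chars.splitOn.go, mySplit]
  | succ n ih =>
    intro l cur accs hl
    cases l with
    | nil => simp [PySem.Chars.splitOn.go, mySplit]
    | cons c rest =>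
      simp only [List.length_cons, Nat.succ_le_succ_iff] at hl
      by_cases hc : c = '_'
      · subst hc
        rw [show PySem.Chars.splitOn.go ['_'] (n+1) ('_' :: rest) cur accs =
              PySem.Chars.splitOn.go ['_'] n rest [] (cur.reverse :: accs) from by
            simp [PySem.Chars.splitOn.go, List.isPrefixOf]]
        rw [ih rest [] (cur.reverse :: accs) hl]
        obtain ⟨h, t, hmt⟩ := mySplit_cons_exists rest
        simp [mySplit, hmt]
      · have hc' : ¬ ('_' = c) := fun h => hc h.symm
        rw [show PySem.Chars.splitOn.go ['_'] (n+1) (c :: rest) cur accs =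
              PySem.Chars.splitOn.go ['_'] n rest (c :: cur) accs from by
            simp [PySem.Chars.splitOn.go, List.isPrefixOf, hc']]
        rw [ih rest (c :: cur) accs hl]
        obtain ⟨h, t, hmt⟩ := mySplit_cons_exists rest
        simp [mySplit, hc, hmt]

theorem splitOn_eq_mySplit (cs : List Char) :
    PySem.Chars.splitOn cs ['_'] = mySplit cs := by
  obtain ⟨h, t, hmt⟩ := mySplit_cons_exists cs
  have := go_spec (cs.length + 1) cs [] [] (Nat.le_succ _)
  simp [PySem.Chars.splitOn, this, hmt]

theorem digit_islower {c : Char} (h : PySem.Chars.isdigit c = true) :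
    PySem.Chars.islower c = false := by
  simp only [PySem.Chars.isdigit, PySem.Chars.islower, Bool.and_eq_true, decide_eq_true_eq,
    Char.le_def, UInt32.le_iff_toNat_le] at *
  simp only [Bool.and_eq_false_iff, decide_eq_false_iff_not, Char.le_def, UInt32.le_iff_toNat_le]
  have e1 : ('9'.val).toNat = 57 := rfl
  have e2 : ('a'.val).toNat = 97 := rfl
  omega

theorem digit_isupper {c : Char} (h : PySem.Chars.isdigit c = true) :
    PySem.Chars.isupper c = false := by
  simp only [PySem.Chars.isdigit, PySem.Chars.isupper, Bool.and_eq_true, decide_eq_true_eq,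
    Char.le_def, UInt32.le_iff_toNat_le] at *
  have e1 : ('9'.val).toNat = 57 := rfl
  have e2 : ('A'.val).toNat = 65 := rfl
  simp only [Bool.and_eq_false_iff, decide_eq_false_iff_not, Char.le_def, UInt32.le_iff_toNat_le]
  omega

theorem digit_upperChar {c : Char} (h : PySem.Chars.isdigit c = true) :
    PySem.Chars.upperChar c = c := by
  simp [PySem.Chars.upperChar, digit_islower h]

theorem digit_lowerChar {c : Char} (h : PySem.Chars.isdigit c = true) :
    PySem.Chars.lowerChar c = c := by
  simp [PySem.Chars.lowerChar, digit_isupper h]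

theorem lower_all_digit (l : List Char) (h : ∀ x ∈ l, PySem.Chars.isdigit x = true) :
    PySem.Chars.lower l = l := by
  induction l with
  | nil => rfl
  | cons x xs ih =>
    simp only [PySem.Chars.lower, List.map_cons, digit_lowerChar (h x (by simp))]
    have := ih (fun y hy => h y (by simp [hy]))
    simp only [PySem.Chars.lower] at this
    rw [this]

-- the per-part contribution in A's loop body
def pieceA (p : List Char) : List Char :=
  if p ≠ [] then
    if PySem.Chars.strIsdigit p then p else pyCapitalizeL p
  else []

theorem pieceA_eq (p : List Char) :
    pieceA p = match p with
               | [] => []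
               | c :: rest => PySem.Chars.upperChar c :: PySem.Chars.lower rest := by
  cases p with
  | nil => rfl
  | cons c rest =>
    by_cases hd : PySem.Chars.strIsdigit (c :: rest) = true
    · have hall := hd
      simp only [PySem.Chars.strIsdigit, Bool.and_eq_true, List.all_eq_true] at hall
      have hc : PySem.Chars.isdigit c = true := hall.2 c (by simp)
      simp only [pieceA, ne_eq, reduceCtorEq, not_false_eq_true, if_pos, if_pos hd]
      rw [digit_upperChar hc, lower_all_digit rest (fun x hx => hall.2 x (by simp [hx]))]
    · simp [pieceA, hd, pyCapitalizeL]

theorem foldA (parts : List (List Char)) (acc : List Char) :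
    parts.foldl (fun result part =>
      if part ≠ [] then
        if PySem.Chars.strIsdigit part then result ++ part
        else result ++ pyCapitalizeL part
      else result) acc = acc ++ (parts.map pieceA).flatten := by
  induction parts generalizing acc with
  | nil => simp
  | cons p ps ih =>
    simp only [List.foldl_cons, List.map_cons, List.flatten_cons, ih, pieceA]
    by_cases hp : p = [] <;> by_cases hd : PySem.Chars.strIsdigit p = true <;>
      simp [hp, hd, List.append_assoc]

theorem pq_main (cs : List Char) :
    ((mySplit cs).map pieceA).flatten = gScan cs true ∧
    PySem.Chars.lower ((mySplit cs).headD []) ++ ((mySplit cs).tail.map pieceA).flatten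
      = gScan cs false := by
  induction cs with
  | nil => simp [mySplit, gScan, pieceA, PySem.Chars.lower]
  | cons c cs ih =>
    by_cases hc : c = '_'
    · subst hc
      constructor
      · simpa [mySplit, gScan, pieceA] using ih.1
      · simpa [mySplit, gScan] using ih.1
    · obtain ⟨h, t, hmt⟩ := mySplit_cons_exists cs
      have ih1 := ih.2
      rw [hmt] at ih1
      simp only [List.headD_cons, List.tail_cons] at ih1
      constructor
      · simp only [mySplit, if_neg hc, hmt, List.headD_cons, List.tail_cons, List.map_cons,
          List.flatten_cons, pieceA_eq, gScan, if_neg hc, if_pos]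
        rw [← ih1]
        simp [PySem.Chars.lower]
      · simp only [mySplit, if_neg hc, hmt, List.headD_cons, List.tail_cons, gScan, if_neg hc]
        simp only [PySem.Chars.lower, List.map_cons, List.cons_append]
        rw [← ih1]
        simp [PySem.Chars.lower]

theorem foldB (cs : List Char) (acc : List Char) (flag : Bool) :
    ((cs.foldl (fun (st : List Char × Bool) ch =>
        if ch = '_' then (st.1, true)
        else if st.2 then (st.1 ++ [PySem.Chars.upperChar ch], false)
        else (st.1 ++ [PySem.Chars.lowerChar ch], false)) (acc, flag)).1)
      = acc ++ gScan cs flag := by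
  induction cs generalizing acc flag with
  | nil => simp [gScan]
  | cons c cs ih =>
    by_cases hc : c = '_'
    · subst hc; simp [gScan, ih]
    · cases flag <;> simp [gScan, hc, ih, List.append_assoc]

-- ===== VERDICT (by name: the statement is the Claim_ definition above) =====
theorem upper_to_camel_spec : Claim_equal_upper_to_camel := by
  unfold Claim_equal_upper_to_camel
  intro uf_name _
  unfold Spec_upper_to_camel upper_to_camel upper_to_camel_alt
  by_cases hs : PySem.Str.startswith uf_name "UF_" = true
  · simp only [hs, Bool.not_true, Bool.false_eq_true, if_false]
    have hpre : ('U' :: 'F' :: '_' :: []) <+: uf_name.toList := by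
      have := (PySem.Chars.startswith_iff uf_name.toList "UF_".toList).mp (by simpa using hs)
      simpa using this
    obtain ⟨cs, hcs⟩ := hpre
    simp only at hcs
    rw [show uf_name.toList = 'U' :: 'F' :: '_' :: cs from hcs.symm]
    rw [show ("_" : String).toList = ['_'] from rfl]
    rw [splitOn_eq_mySplit]
    obtain ⟨h, t, hmt⟩ := mySplit_cons_exists cs
    rw [show mySplit ('U' :: 'F' :: '_' :: cs) = ['U', 'F'] :: mySplit cs from by
      simp [mySplit]]
    simp only [List.headD_cons, List.drop_one, List.tail_cons]
    rw [foldA]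
    rw [show PySem.List.slice ('U' :: 'F' :: '_' :: cs) (some 3) none = cs from by
      rw [PySem.List.slice_from] <;> simp]
    rw [foldB]
    rw [(pq_main cs).1]
    rfl
  · simp only [Bool.not_eq_true] at hs
    have hs' : PySem.Chars.startswith uf_name.toList ['U', 'F', '_'] = false := by
      simpa using hs
    simp [hs']
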